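-- pv_equiv track=rewrite | github.com/siddhantagwl/fji | yearly_performance_points.py | calc_performance_points
-- ===== SOURCE A (Python) =====
-- def get_performance_points_chart(target_kpi):
--
--     bucket_size = target_kpi // 4
--
--     number_list = list(range(0, target_kpi + 1))
--     grouped_numbers = [number_list[i:i+bucket_size] for i in range(0, len(number_list), bucket_size)]
--
--     # add a point for 0
--     point_chart = {(0, 0):0}
--
--     # start with point value 1
--     points = 1
--
--     for i, group in enumerate(grouped_numbers):
--
--         start_rng, end_rng = group[0], group[-1]
--         if i == 0:
--             # change the point that needs to be start with 1 rather than 0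
--             # coz if actual kpi = 0 then points = 0
--             start_rng += 1
--
--         point_chart[(start_rng, end_rng)] = points
--         # increment point value for next group
--         points += 1
--
--     return point_chart
--
-- def calc_performance_points(actual_kpi, target_kpi):
--
--     point_chart = get_performance_points_chart(target_kpi)
--
--     if actual_kpi == 0:
--         return 0
--
--     if actual_kpi >= target_kpi:
--         return 5
--
--     for (start_rng, end_rng), point in point_chart.items():
--         if start_rng <= actual_kpi <= end_rng:
--             return point
--     return
-- ===== SOURCE B (Python) =====
-- def calc_performance_points(actual_kpi, target_kpi):
--     # O(1) arithmetic instead of building the whole point chart.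
--     if actual_kpi == 0:
--         return 0
--     if actual_kpi >= target_kpi:
--         return 5
--     if actual_kpi < 0:
--         return None  # below every bucket of the chart
--     return actual_kpi // (target_kpi // 4) + 1
-- ===== Notes on version B (the rewrite author's own statement) =====
-- stated objective: faster
-- what changed: B replaces building the whole O(target_kpi) bucket chart and scanning it with a single O(1) floor-division formula actual_kpi // (target_kpi // 4) + 1, with the same 0 / >= target / negative edge cases.
import Mathlib
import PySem

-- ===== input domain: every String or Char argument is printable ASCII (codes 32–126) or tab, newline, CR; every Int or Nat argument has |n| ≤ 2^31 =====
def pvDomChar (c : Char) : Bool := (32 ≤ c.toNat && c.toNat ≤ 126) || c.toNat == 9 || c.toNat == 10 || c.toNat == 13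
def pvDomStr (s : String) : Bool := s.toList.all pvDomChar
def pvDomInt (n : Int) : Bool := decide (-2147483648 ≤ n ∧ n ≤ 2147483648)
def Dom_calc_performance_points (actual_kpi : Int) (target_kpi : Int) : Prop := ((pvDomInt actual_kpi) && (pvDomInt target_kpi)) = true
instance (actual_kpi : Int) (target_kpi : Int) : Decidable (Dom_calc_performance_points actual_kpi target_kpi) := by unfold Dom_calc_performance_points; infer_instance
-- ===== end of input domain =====

-- B replaces A's O(target_kpi) bucket-chart construction and linear scan by a single
-- floor-division formula with the same 0 / >= target / negative edge cases.


-- ===== PORT A =====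
def get_performance_points_chart (target_kpi : Int) : PySem.Dict (Int × Int) Int :=
  let bucket_size := PySem.Int.floordiv target_kpi 4
  let number_list := PySem.List.pyRange 0 (target_kpi + 1) 1
  let grouped_numbers := (PySem.List.pyRange 0 (number_list.length : Int) bucket_size).map
    (fun i => PySem.List.slice number_list (some i) (some (i + bucket_size)))
  let init : PySem.Dict (Int × Int) Int := PySem.Dict.empty.insert (0, 0) 0
  ((PySem.List.enumerate grouped_numbers 0).foldl
    (fun (st : PySem.Dict (Int × Int) Int × Int) ig =>
      -- group[0] / group[-1]: Python raises IndexError on an empty group; inside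
      -- Pre_ every group is nonempty, so the .getD 0 default is never used there
      let start_rng0 := (PySem.List.pyGet? ig.2 0).getD 0
      let end_rng := (PySem.List.pyGet? ig.2 (-1)).getD 0
      let start_rng := if ig.1 = 0 then start_rng0 + 1 else start_rng0
      (st.1.insert (start_rng, end_rng) st.2, st.2 + 1))
    (init, 1)).1

def calc_performance_points (actual_kpi : Int) (target_kpi : Int) : Option Int :=
  let point_chart := get_performance_points_chart target_kpi
  if actual_kpi = 0 then some 0
  else if actual_kpi ≥ target_kpi then some 5
  else
    match point_chart.items.find?
        (fun p => decide (p.1.1 ≤ actual_kpi) && decide (actual_kpi ≤ p.1.2)) with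
    | some p => some p.2
    | none => none

-- ===== PORT B =====
def calc_performance_points_alt (actual_kpi : Int) (target_kpi : Int) : Option Int :=
  if actual_kpi = 0 then some 0
  else if actual_kpi ≥ target_kpi then some 5
  else if actual_kpi < 0 then none
  else some (PySem.Int.floordiv actual_kpi (PySem.Int.floordiv target_kpi 4) + 1)

-- ===== PRECONDITION & SPEC =====
-- Pre_ excludes exactly 0 <= target_kpi <= 3: there bucket_size = target_kpi//4 = 0 makes
-- range()'s step zero and A raises ValueError for every actual_kpi.
def Pre_calc_performance_points (actual_kpi : Int) (target_kpi : Int) : Prop :=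
  target_kpi < 0 ∨ 4 ≤ target_kpi
instance (actual_kpi : Int) (target_kpi : Int) : Decidable (Pre_calc_performance_points actual_kpi target_kpi) := by unfold Pre_calc_performance_points; infer_instance

def pvWitness_calc_performance_points : Int × Int := (3, 12)

def Spec_calc_performance_points (actual_kpi : Int) (target_kpi : Int) (out : Option Int) : Prop := out = calc_performance_points_alt actual_kpi target_kpi
instance (actual_kpi : Int) (target_kpi : Int) (out : Option Int) : Decidable (Spec_calc_performance_points actual_kpi target_kpi out) := by unfold Spec_calc_performance_points; infer_instance

-- ===== CLAIM (what is proved, stated in full; the proofs are below) =====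
def Claim_equal_calc_performance_points : Prop := ∀ (actual_kpi : Int) (target_kpi : Int), Dom_calc_performance_points actual_kpi target_kpi → Pre_calc_performance_points actual_kpi target_kpi → Spec_calc_performance_points actual_kpi target_kpi (calc_performance_points actual_kpi target_kpi)

-- ===== LEMMAS AND PROOFS =====

theorem pv_chart_neg (t : Int) (ht : t < 0) :
    (get_performance_points_chart t).items = [((0, 0), 0)] := by
  unfold get_performance_points_chart
  rw [PySem.List.pyRange_one_eq_nil (by omega)]
  simp [PySem.List.pyRange, PySem.Dict.items_insert_of_not_contains, PySem.Dict.empty]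

theorem pv_slice_pyRange (L i j : Int) (h0 : 0 ≤ i) (hij : i ≤ j) :
    PySem.List.slice (PySem.List.pyRange 0 L 1) (some i) (some j) =
      PySem.List.pyRange i (min j L) 1 := by
  rw [PySem.List.slice_toNat _ h0 (le_trans h0 hij)]
  apply List.ext_getElem
  · simp [PySem.List.length_pyRange_one]; omega
  · intro k h1 h2
    simp only [List.getElem_take, List.getElem_drop, PySem.List.getElem_pyRange_one]
    push_cast
    omega

def pvEnt (b t : Int) (k : Nat) : (Int × Int) × Int :=
  ((if k = 0 then 1 else b * k, min (b * k + b - 1) t), (k : Int) + 1)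

theorem pv_enumerate_map_range {β : Type} (g : Nat → β) (m : Nat) :
    PySem.List.enumerate ((List.range m).map g) 0 = (List.range m).map (fun (k : Nat) => ((k : Int), g k)) := by
  induction m with
  | zero => simp [PySem.List.enumerate_nil]
  | succ n ih =>
    rw [List.range_succ]
    simp only [List.map_append, List.map_cons, List.map_nil, PySem.List.enumerate_append, ih]
    simp [PySem.List.enumerate_cons, PySem.List.enumerate_nil]

theorem pv_key_fresh (b t : Int) (hb : 1 ≤ b) (n : Nat) (hnt : b * (n : Int) ≤ t) :
    ((if n = 0 then (1 : Int) else b * n), min (b * (n : Int) + b - 1) t) ∉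
      (((0 : Int), (0 : Int)) :: (List.range n).map (fun j => (pvEnt b t j).1)) := by
  intro hmem
  rcases List.mem_cons.mp hmem with h | h
  · rcases Nat.eq_zero_or_pos n with rfl | hn
    · simp at h
    · rw [if_neg (by omega), Prod.mk.injEq] at h
      have : (1 : Int) ≤ (n : Int) := by exact_mod_cast hn
      nlinarith [h.1]
  · obtain ⟨j, hj, hje⟩ := List.mem_map.mp h
    have hjn : j < n := List.mem_range.mp hj
    have h2 : b * ((j : Int) + 1) ≤ b * (n : Int) :=
      mul_le_mul_of_nonneg_left (by exact_mod_cast hjn) (by omega)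
    unfold pvEnt at hje
    rw [Prod.mk.injEq] at hje
    have := hje.2
    have h3 : b * (j : Int) + b ≤ b * (n : Int) := by linarith [h2]
    omega

theorem pv_group_first (b t : Int) (hb : 1 ≤ b) (k : Nat) (hk : b * (k : Int) ≤ t) :
    (PySem.List.pyGet? (PySem.List.slice (PySem.List.pyRange 0 (t + 1) 1)
        (some (b * (k : Int))) (some (b * (k : Int) + b))) 0).getD 0 = b * (k : Int) := by
  rw [pv_slice_pyRange _ _ _ (by positivity) (by omega), PySem.List.pyGet?_zero,
    PySem.List.getElem?_pyRange_one]
  rw [if_pos (by omega)]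
  simp

theorem pv_group_last (b t : Int) (hb : 1 ≤ b) (k : Nat) (hk : b * (k : Int) ≤ t) :
    (PySem.List.pyGet? (PySem.List.slice (PySem.List.pyRange 0 (t + 1) 1)
        (some (b * (k : Int))) (some (b * (k : Int) + b))) (-1)).getD 0 = min (b * (k : Int) + b - 1) t := by
  rw [pv_slice_pyRange _ _ _ (by positivity) (by omega), PySem.List.pyGet?_neg_one,
    List.getLast?_eq_getElem?, PySem.List.length_pyRange_one, PySem.List.getElem?_pyRange_one]
  rw [if_pos (by omega)]
  simp only [Option.getD_some]
  omega

theorem pv_fold (b t : Int) (hb : 1 ≤ b) (n : Nat) (hn : ∀ k : Nat, k < n → b * (k : Int) ≤ t) :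
    List.foldl
      (fun (st : PySem.Dict (Int × Int) Int × Int) (ig : Int × List Int) =>
        (st.1.insert
            (if ig.1 = 0 then (PySem.List.pyGet? ig.2 0).getD 0 + 1 else (PySem.List.pyGet? ig.2 0).getD 0,
              (PySem.List.pyGet? ig.2 (-1)).getD 0)
            st.2,
          st.2 + 1))
      (PySem.Dict.empty.insert (0, 0) 0, 1)
      ((List.range n).map (fun (k : Nat) => ((k : Int),
        PySem.List.slice (PySem.List.pyRange 0 (t + 1) 1) (some (b * (k : Int))) (some (b * (k : Int) + b)))))
    = (PySem.Dict.mk (((0, 0), 0) :: (List.range n).map (pvEnt b t)), (n : Int) + 1) := by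
  induction n with
  | zero =>
    simp only [List.range_zero, List.map_nil, List.foldl_nil, Nat.cast_zero, zero_add]
    refine Prod.ext ?_ rfl
    apply PySem.Dict.ext
    simp [PySem.Dict.items_insert_of_not_contains, PySem.Dict.empty]
  | succ n ih =>
    rw [List.range_succ, List.map_append, List.foldl_append, ih (fun k hk => hn k (by omega))]
    simp only [List.map_cons, List.map_nil, List.foldl_cons, List.foldl_nil]
    have hkey := pv_key_fresh b t hb n (hn n (by omega))
    have hfresh : (PySem.Dict.mk (((0, 0), 0) :: (List.range n).map (pvEnt b t))).contains
        ((if n = 0 then (1 : Int) else b * n), min (b * (n : Int) + b - 1) t) = false := by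
      rw [PySem.Dict.contains_eq_decide_mem_keys]
      simp only [PySem.Dict.keys_mk, List.map_cons, List.map_map, decide_eq_false_iff_not]
      simpa using hkey
    refine Prod.ext ?_ (by push_cast; ring)
    apply PySem.Dict.ext
    rw [pv_group_first b t hb n (hn n (by omega)), pv_group_last b t hb n (hn n (by omega))]
    have hifeq : (if (n : Int) = 0 then b * (n : Int) + 1 else b * (n : Int)) =
        (if n = 0 then (1 : Int) else b * n) := by
      rcases Nat.eq_zero_or_pos n with rfl | hpos
      · simp
      · rw [if_neg (by exact_mod_cast Nat.pos_iff_ne_zero.mp hpos), if_neg (by omega)]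
    rw [hifeq, PySem.Dict.items_insert_of_not_contains _ _ hfresh]
    simp only [List.map_append]
    rfl

theorem pv_chart_items (t : Int) (ht : 4 ≤ t) :
    (get_performance_points_chart t).items =
      ((0, 0), 0) ::
        (List.range ((t + PySem.Int.floordiv t 4) / PySem.Int.floordiv t 4).toNat).map
          (pvEnt (PySem.Int.floordiv t 4) t) := by
  have hb4 : PySem.Int.floordiv t 4 = t / 4 := PySem.Int.floordiv_eq_ediv_of_pos (by norm_num)
  set b := PySem.Int.floordiv t 4 with hbdef
  have hb : 1 ≤ b := by rw [hb4]; omega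
  have hcnt : (t + 1 - 0 + b - 1) / b = (t + b) / b := by ring_nf
  have hmem : ∀ k : Nat, k < ((t + 1 - 0 + b - 1) / b).toNat → b * (k : Int) ≤ t := by
    intro k hk
    have h1 : (k : Int) + 1 ≤ (t + b) / b := by rw [← hcnt]; omega
    have h2 := (Int.le_ediv_iff_mul_le (by omega : (0:Int) < b)).mp h1
    linarith [h2]
  unfold get_performance_points_chart
  dsimp only
  rw [show ((PySem.List.pyRange 0 (t + 1) 1).length : Int) = t + 1 by
        rw [PySem.List.length_pyRange_one]; omega]
  rw [PySem.List.pyRange_of_pos 0 (t + 1) (by omega : (0:Int) < b),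
    if_pos (by omega : (0:Int) < t + 1), List.map_map]
  simp only [Function.comp_def, zero_add]
  rw [pv_enumerate_map_range, pv_fold b t hb _ hmem]
  rw [hcnt]

theorem pv_find (b t a : Int) (hb : 1 ≤ b) (ha : 1 ≤ a) (hat : a < t) (m : Nat)
    (hm : (a / b).toNat < m) :
    List.find? (fun p => decide (p.1.1 ≤ a) && decide (a ≤ p.1.2))
      ((List.range m).map (pvEnt b t)) = some (pvEnt b t (a / b).toNat) := by
  set q := (a / b).toNat with hqdef
  have hq' : (q : Int) = a / b := Int.toNat_of_nonneg (Int.ediv_nonneg (by omega) (by omega))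
  have e := Int.mul_ediv_add_emod a b
  have r1 := Int.emod_nonneg a (by omega : b ≠ 0)
  have r2 := Int.emod_lt_of_pos a (by omega : 0 < b)
  have hbq : b * (a / b) = b * (q : Int) := by rw [hq']
  have hlow : b * (q : Int) ≤ a := by omega
  have hhigh : a < b * (q : Int) + b := by omega
  rw [show m = q + 1 + (m - (q + 1)) by omega, List.range_add, List.map_append,
    List.find?_append, List.range_succ, List.map_append, List.find?_append]
  have h1 : List.find? (fun p => decide (p.1.1 ≤ a) && decide (a ≤ p.1.2))
      ((List.range q).map (pvEnt b t)) = none := by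
    rw [List.find?_eq_none]
    rintro p hp
    obtain ⟨j, hj, rfl⟩ := List.mem_map.mp hp
    have hjq : j < q := List.mem_range.mp hj
    have h2 : b * ((j : Int) + 1) ≤ b * (q : Int) :=
      mul_le_mul_of_nonneg_left (by exact_mod_cast hjq) (by omega)
    have h3 : b * ((j : Int) + 1) = b * (j : Int) + b := by ring
    simp only [pvEnt, Bool.and_eq_true, decide_eq_true_eq, not_and]
    intro _
    omega
  have h2 : List.find? (fun p => decide (p.1.1 ≤ a) && decide (a ≤ p.1.2))
      [pvEnt b t q] = some (pvEnt b t q) := by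
    rw [List.find?_cons_of_pos]
    simp only [pvEnt, Bool.and_eq_true, decide_eq_true_eq]
    constructor
    · split_ifs with h
      · omega
      · have : 1 ≤ q := Nat.one_le_iff_ne_zero.mpr h
        have : (1 : Int) ≤ (q : Int) := by exact_mod_cast this
        nlinarith
    · omega
  simp only [List.map_cons, List.map_nil]
  rw [h1, h2]
  simp

theorem pv_spec (a t : Int) (hpre : Pre_calc_performance_points a t) :
    calc_performance_points a t = calc_performance_points_alt a t := by
  unfold calc_performance_points calc_performance_points_alt
  dsimp only
  by_cases ha0 : a = 0
  · rw [if_pos ha0, if_pos ha0]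
  rw [if_neg ha0, if_neg ha0]
  by_cases hat : a ≥ t
  · rw [if_pos hat, if_pos hat]
  rw [if_neg hat, if_neg hat]
  rcases hpre with htneg | htpos
  · have ha : a < 0 := by omega
    rw [pv_chart_neg t htneg, if_pos ha]
    have hp : (decide (((0:Int),(0:Int)).1 ≤ a) && decide (a ≤ ((0:Int),(0:Int)).2)) = false := by
      simp; omega
    simp [List.find?, hp]
  · have hb4 : PySem.Int.floordiv t 4 = t / 4 := PySem.Int.floordiv_eq_ediv_of_pos (by norm_num)
    set b := PySem.Int.floordiv t 4 with hbdef
    have hb : 1 ≤ b := by rw [hb4]; omega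
    rw [pv_chart_items t htpos]
    by_cases haneg : a < 0
    · rw [if_pos haneg]
      have hnone : List.find? (fun p => decide (p.1.1 ≤ a) && decide (a ≤ p.1.2))
          ((((0:Int),(0:Int)), (0:Int)) :: (List.range ((t + b)/b).toNat).map (pvEnt b t)) = none := by
        rw [List.find?_eq_none]
        rintro p hp
        rcases List.mem_cons.mp hp with rfl | hp
        · simp; omega
        · obtain ⟨j, hj, rfl⟩ := List.mem_map.mp hp
          simp only [pvEnt, Bool.and_eq_true, decide_eq_true_eq, not_and]
          intro h1
          exfalso
          rcases Nat.eq_zero_or_pos j with rfl | hj0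
          · simp at h1; omega
          · rw [if_neg (by omega)] at h1
            have : (1:Int) ≤ (j:Int) := by exact_mod_cast hj0
            nlinarith
      rw [hnone]
    · rw [if_neg haneg]
      have ha1 : 1 ≤ a := by omega
      have hat' : a < t := by omega
      have e := Int.mul_ediv_add_emod a b
      have r1 := Int.emod_nonneg a (by omega : b ≠ 0)
      have r2 := Int.emod_lt_of_pos a (by omega : 0 < b)
      have hq0 : 0 ≤ a / b := Int.ediv_nonneg (by omega) (by omega)
      have hm : (a/b).toNat < ((t + b)/b).toNat := by
        have h1 : (a/b) + 1 ≤ (t+b)/b := by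
          rw [Int.le_ediv_iff_mul_le (by omega : (0:Int) < b)]
          nlinarith [e, r1, r2]
        omega
      rw [List.find?_cons_of_neg (by simp; omega)]
      rw [pv_find b t a hb ha1 hat' _ hm]
      have hq' : (((a/b).toNat : Nat) : Int) = a / b := Int.toNat_of_nonneg hq0
      have hfd : PySem.Int.floordiv a b = a / b := PySem.Int.floordiv_eq_ediv_of_pos (by omega)
      simp [pvEnt, hq', hfd]

-- ===== VERDICT (by name: the statement is the Claim_ definition above) =====
theorem calc_performance_points_spec : Claim_equal_calc_performance_points := by
  intro a t _ hpre
  exact pv_spec a t hpre
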